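-- pv_equiv track=rewrite | github.com/Thomas-Durand-Texte/OC-formation-Ingenieur-Machine-Learning | Projetcs/02_FoodFacts/tools.py | lst_str_remove_items_containing_key
-- ===== SOURCE A (Python) =====
-- def lst_str_remove_items_containing_key( lst_str, lst_keys_to_remove ):
--     """ lst_out = lst_str_remove_items_containing_key( lst_str, lst_keys_to_remove )\n\n
--         Create a new list with the items (strings) not containing one of the key in lst_keys_to_remove
--         """
--     lst_out = []
--     for cat in lst_str:
--         not_to_add = False
--         for key in lst_keys_to_remove:
--             if key in cat:
--                 not_to_add = True
--                 break
--         if not_to_add: continue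
--         lst_out.append( cat )
--     return lst_out
-- ===== SOURCE B (Python) =====
-- def lst_str_remove_items_containing_key(lst_str, lst_keys_to_remove):
--     """Same result, different traversal: iterate over the keys (outer) and
--     repeatedly narrow the surviving list, instead of scanning all keys per string."""
--     remaining = list(lst_str)
--     for key in lst_keys_to_remove:
--         remaining = [s for s in remaining if key not in s]
--     return remaining
-- ===== Notes on version B (the rewrite author's own statement) =====
-- stated objective: alternative
-- what changed: B swaps the loop nesting: instead of testing every key inside a per-string loop with a break flag, it folds over the keys, filtering the surviving list once per key.
import Mathlib
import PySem

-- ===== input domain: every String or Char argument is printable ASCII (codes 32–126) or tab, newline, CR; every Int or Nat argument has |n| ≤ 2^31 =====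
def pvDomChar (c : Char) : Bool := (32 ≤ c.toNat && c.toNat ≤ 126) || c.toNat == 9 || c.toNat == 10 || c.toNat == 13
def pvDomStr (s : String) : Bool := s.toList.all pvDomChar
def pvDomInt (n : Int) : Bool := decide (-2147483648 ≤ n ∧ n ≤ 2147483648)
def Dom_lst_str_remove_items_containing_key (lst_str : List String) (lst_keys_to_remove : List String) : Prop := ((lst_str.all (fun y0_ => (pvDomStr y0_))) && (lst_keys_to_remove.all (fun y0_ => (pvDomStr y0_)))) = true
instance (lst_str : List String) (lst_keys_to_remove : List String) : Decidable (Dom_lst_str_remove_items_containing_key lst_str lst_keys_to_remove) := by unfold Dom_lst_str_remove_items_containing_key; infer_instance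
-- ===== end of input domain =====

-- ===== PORT A =====
-- A: per string, scan the keys with a break flag; append to lst_out when no key is contained.
def lst_str_remove_items_containing_key (lst_str : List String) (lst_keys_to_remove : List String) : List String :=
  lst_str.foldl (fun lst_out cat =>
    let not_to_add := lst_keys_to_remove.any (fun key => PySem.Str.isIn key cat)
    if not_to_add then lst_out else lst_out ++ [cat]) []

-- ===== PORT B =====
-- B: fold over the keys, narrowing the surviving list by one filter per key.
def lst_str_remove_items_containing_key_alt (lst_str : List String) (lst_keys_to_remove : List String) : List String :=
  lst_keys_to_remove.foldl (fun remaining key => remaining.filter (fun s => !(PySem.Str.isIn key s))) lst_str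

-- ===== PRECONDITION & SPEC =====
def Spec_lst_str_remove_items_containing_key (lst_str : List String) (lst_keys_to_remove : List String) (out : List String) : Prop := out = lst_str_remove_items_containing_key_alt lst_str lst_keys_to_remove
instance (lst_str : List String) (lst_keys_to_remove : List String) (out : List String) : Decidable (Spec_lst_str_remove_items_containing_key lst_str lst_keys_to_remove out) := by unfold Spec_lst_str_remove_items_containing_key; infer_instance

-- ===== CLAIM (what is proved, stated in full; the proofs are below) =====
def Claim_equal_lst_str_remove_items_containing_key : Prop := ∀ (lst_str : List String) (lst_keys_to_remove : List String), Dom_lst_str_remove_items_containing_key lst_str lst_keys_to_remove → Spec_lst_str_remove_items_containing_key lst_str lst_keys_to_remove (lst_str_remove_items_containing_key lst_str lst_keys_to_remove)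

-- ===== LEMMAS AND PROOFS =====
-- Folding key-filters over a list equals one filter with the conjunction of all key tests.
-- 'skip on p, else append' foldl is filtering by !p.
theorem foldl_skip_if (p : String → Bool) (l : List String) (acc : List String) :
    l.foldl (fun out x => if p x then out else out ++ [x]) acc = acc ++ l.filter (fun x => !p x) := by
  induction l generalizing acc with
  | nil => simp
  | cons a t ih =>
      by_cases h : p a = true <;> simp [List.foldl_cons, h, ih]

theorem foldl_filter_eq_filter_all (keys : List String) (lst : List String) :
    keys.foldl (fun remaining key => remaining.filter (fun s => !(PySem.Str.isIn key s))) lst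
      = lst.filter (fun s => !(keys.any (fun key => PySem.Str.isIn key s))) := by
  induction keys generalizing lst with
  | nil => simp
  | cons k ks ih =>
      simp only [List.foldl_cons, ih, List.filter_filter]
      apply List.filter_congr
      intro s _
      simp [List.any_cons, Bool.not_or, Bool.and_comm]

-- ===== VERDICT (by name: the statement is the Claim_ definition above) =====
theorem lst_str_remove_items_containing_key_spec : Claim_equal_lst_str_remove_items_containing_key := by
  intro lst_str lst_keys _
  unfold Spec_lst_str_remove_items_containing_key
  unfold lst_str_remove_items_containing_key lst_str_remove_items_containing_key_alt
  rw [foldl_filter_eq_filter_all]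
  simpa using foldl_skip_if (fun cat => lst_keys.any (fun key => PySem.Str.isIn key cat)) lst_str []
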